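-- pv_equiv track=rewrite | github.com/paulklemstine/factor | lean/demo/Pythagorean/quantum_gate_optimization_demo.py | r3
-- ===== SOURCE A (Python) =====
-- import math
--
-- def r3(n: int) -> int:
--     """Count representations of n as sum of 3 squares"""
--     count = 0
--     bound = int(math.isqrt(n))
--     for a in range(-bound, bound + 1):
--         for b in range(-bound, bound + 1):
--             rem = n - a*a - b*b
--             if rem < 0:
--                 continue
--             c = int(math.isqrt(rem))
--             if c*c == rem:
--                 count += 1
--                 if c > 0:
--                     count += 1
--     return count
-- ===== SOURCE B (Python) =====
-- import math
--
-- def _r2(m: int) -> int: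
--     """Signed ordered representations of a nonnegative m as a sum of 2 squares,
--     scanning only b >= 0 and weighting by sign multiplicity."""
--     total = 0
--     for b in range(math.isqrt(m) + 1):
--         rem = m - b * b
--         c = math.isqrt(rem)
--         if c * c == rem:
--             total += (1 if b == 0 else 2) * (1 if c == 0 else 2)
--     return total
--
-- def r3(n: int) -> int:
--     s = math.isqrt(n)
--     total = _r2(n)
--     for a in range(1, s + 1):
--         total += 2 * _r2(n - a * a)
--     return total
-- ===== Notes on version B (the rewrite author's own statement) =====
-- stated objective: faster
-- what changed: B decomposes r3 into a sum of two-square counts r2(n-a^2), scans only nonnegative a and b with sign-multiplicity weights (x2 for each nonzero coordinate) and tightens the inner bound to isqrt(n-a^2), instead of A's full double loop over [-isqrt(n), isqrt(n)]^2 with a skip branch.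
import Mathlib
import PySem

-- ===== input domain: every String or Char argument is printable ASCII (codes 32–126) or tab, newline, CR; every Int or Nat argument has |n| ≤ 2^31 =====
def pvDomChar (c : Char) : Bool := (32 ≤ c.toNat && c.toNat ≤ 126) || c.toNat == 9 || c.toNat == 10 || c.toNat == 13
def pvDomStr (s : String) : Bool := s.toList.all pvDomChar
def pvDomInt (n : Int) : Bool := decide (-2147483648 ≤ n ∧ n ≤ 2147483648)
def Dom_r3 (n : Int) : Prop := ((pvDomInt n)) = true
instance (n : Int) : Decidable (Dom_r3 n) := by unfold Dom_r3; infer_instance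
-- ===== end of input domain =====

-- B replaces A's full double loop over [-isqrt n, isqrt n]^2 by a sum of weighted
-- nonnegative-octant two-square counts r2(n - a^2); same return value on all of Pre_.

-- math.isqrt(x): exact floor square root for x ≥ 0 (Python raises ValueError for x < 0,
-- excluded by Pre_r3; the toNat clamp is only reached outside Pre_).
def isqrtI (x : Int) : Int := (Nat.sqrt x.toNat : Int)

-- ===== PORT A =====
def r3 (n : Int) : Int :=
  let bound := isqrtI n
  (PySem.List.pyRange (-bound) (bound + 1) 1).foldl (fun count a =>
    (PySem.List.pyRange (-bound) (bound + 1) 1).foldl (fun count b =>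
      let rem := n - a * a - b * b
      if rem < 0 then count
      else
        let c := isqrtI rem
        if c * c = rem then
          let count := count + 1
          if c > 0 then count + 1 else count
        else count) count) 0

-- ===== PORT B =====
def r2B (m : Int) : Int :=
  (PySem.List.pyRange 0 (isqrtI m + 1) 1).foldl (fun total b =>
    let rem := m - b * b
    let c := isqrtI rem
    if c * c = rem then
      total + (if b = 0 then 1 else 2) * (if c = 0 then 1 else 2)
    else total) 0

def r3_alt (n : Int) : Int :=
  let s := isqrtI n
  (PySem.List.pyRange 1 (s + 1) 1).foldl (fun total a => total + 2 * r2B (n - a * a)) (r2B n)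

-- ===== PRECONDITION & SPEC =====
-- Pre_ excludes exactly n < 0, where math.isqrt (hence A, and B alike) raises ValueError.
def Pre_r3 (n : Int) : Prop := 0 ≤ n
instance (n : Int) : Decidable (Pre_r3 n) := by unfold Pre_r3; infer_instance
def pvWitness_r3 : Int := 5

def Spec_r3 (n : Int) (out : Int) : Prop := out = r3_alt n
instance (n : Int) (out : Int) : Decidable (Spec_r3 n out) := by unfold Spec_r3; infer_instance

-- ===== CLAIM (what is proved, stated in full; the proofs are below) =====
def Claim_equal_r3 : Prop := ∀ (n : Int), Dom_r3 n → Pre_r3 n → Spec_r3 n (r3 n)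


-- ===== LEMMAS AND PROOFS =====

-- contribution of one (a,b) cell in A: 0 unless rem is a perfect square, then 1 or 2
def stepT (r : Int) : Int :=
  if r < 0 then 0
  else if isqrtI r * isqrtI r = r then (if isqrtI r > 0 then 2 else 1) else 0

lemma isqrtI_nonneg (x : Int) : 0 ≤ isqrtI x := by
  simp [isqrtI]

lemma isqrtI_sq_le {x : Int} (hx : 0 ≤ x) : isqrtI x * isqrtI x ≤ x := by
  have h : ((Nat.sqrt x.toNat * Nat.sqrt x.toNat : Nat) : Int) ≤ (x.toNat : Int) :=
    Int.ofNat_le.mpr (Nat.sqrt_le x.toNat)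
  rw [Int.toNat_of_nonneg hx] at h
  push_cast at h
  simpa [isqrtI] using h

lemma lt_isqrtI_succ_sq {x : Int} (hx : 0 ≤ x) : x < (isqrtI x + 1) * (isqrtI x + 1) := by
  have h : (x.toNat : Int) < (((Nat.sqrt x.toNat).succ * (Nat.sqrt x.toNat).succ : Nat) : Int) :=
    Int.ofNat_lt.mpr (Nat.lt_succ_sqrt x.toNat)
  rw [Int.toNat_of_nonneg hx] at h
  push_cast at h
  simpa [isqrtI] using h

lemma isqrtI_mono {x y : Int} (h : x ≤ y) : isqrtI x ≤ isqrtI y := by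
  have := Nat.sqrt_le_sqrt (Int.toNat_le_toNat h)
  simp only [isqrtI]
  exact_mod_cast this

-- negative argument contributes nothing
lemma stepT_neg {r : Int} (h : r < 0) : stepT r = 0 := by
  simp [stepT, h]

-- glue: a foldl whose body is pointwise "acc + g x" is init + sum
lemma foldl_eq_add_sum (l : List Int) (init : Int) (f : Int → Int → Int) (g : Int → Int)
    (h : ∀ acc x, f acc x = acc + g x) : l.foldl f init = init + (l.map g).sum := by
  rw [show f = fun acc x => acc + g x from funext fun a => funext fun x => h a x]
  exact PySem.List.foldl_add l g init

-- symmetric range: sum of an even function over [-t, t]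
lemma sum_sym (g : Int → Int) (hg : ∀ x, g (-x) = g x) (t : Nat) :
    ((PySem.List.pyRange (-(t : Int)) ((t : Int) + 1) 1).map g).sum
      = g 0 + 2 * ((PySem.List.pyRange 1 ((t : Int) + 1) 1).map g).sum := by
  induction t with
  | zero =>
    have h0 : PySem.List.pyRange (0 : Int) 1 1 = [0] := by decide
    have h1 : PySem.List.pyRange (1 : Int) 1 1 = [] := by decide
    simp only [Nat.cast_zero, neg_zero, zero_add, h0, h1, List.map_cons, List.map_nil,
      List.sum_cons, List.sum_nil]
    ring
  | succ t ih =>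
    have h1 : PySem.List.pyRange (-((t : Int) + 1)) (((t : Int) + 1) + 1) 1
        = (-((t : Int) + 1)) :: (PySem.List.pyRange (-(t : Int)) ((t : Int) + 1) 1 ++ [(t : Int) + 1]) := by
      rw [PySem.List.pyRange_one_cons (by omega : (-((t : Int) + 1)) < ((t : Int) + 1) + 1)]
      rw [show (-((t : Int) + 1)) + 1 = -(t : Int) by ring]
      rw [PySem.List.pyRange_one_succ_right (by omega : (-(t : Int)) ≤ (t : Int) + 1)]
    have h2 : PySem.List.pyRange (1 : Int) (((t : Int) + 1) + 1) 1
        = PySem.List.pyRange 1 ((t : Int) + 1) 1 ++ [(t : Int) + 1] :=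
      PySem.List.pyRange_one_succ_right (by omega)
    push_cast
    rw [h1, h2]
    simp only [List.map_cons, List.map_append, List.sum_cons, List.sum_append, List.map_cons,
      List.map_nil, List.sum_nil]
    rw [hg ((t : Int) + 1)]
    linarith [ih]

-- truncation: terms vanishing above t can be dropped
lemma sum_trunc (g : Int → Int) (t s : Int) (h0 : 0 ≤ t) (hts : t ≤ s)
    (hz : ∀ x, t < x → x ≤ s → g x = 0) :
    ((PySem.List.pyRange 1 (s + 1) 1).map g).sum
      = ((PySem.List.pyRange 1 (t + 1) 1).map g).sum := by
  rw [PySem.List.pyRange_one_append 1 (t + 1) (s + 1) (by omega) (by omega),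
      List.map_append, List.sum_append]
  have hzero : ((PySem.List.pyRange (t + 1) (s + 1) 1).map g).sum = 0 := by
    apply List.sum_eq_zero
    intro x hx
    simp only [List.mem_map] at hx
    obtain ⟨y, hy, rfl⟩ := hx
    rw [PySem.List.mem_pyRange_one] at hy
    exact hz y (by omega) (by omega)
  omega

-- A's inner loop body over b ∈ [-isqrt n, isqrt n] sums to r2B (n - a²) when a² ≤ n
lemma inner_eq_r2B (n a : Int) (_hn : 0 ≤ n) (ha : a * a ≤ n) :
    ((PySem.List.pyRange (-(isqrtI n)) (isqrtI n + 1) 1).map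
        (fun b => stepT (n - a * a - b * b))).sum = r2B (n - a * a) := by
  set m := n - a * a with hm_def
  have hm : 0 ≤ m := by omega
  have hmn : m ≤ n := by nlinarith [mul_self_nonneg a]
  set s := isqrtI n with hs_def
  set t := isqrtI m with ht_def
  have hs0 : 0 ≤ s := isqrtI_nonneg n
  have ht0 : 0 ≤ t := isqrtI_nonneg m
  have hts : t ≤ s := isqrtI_mono hmn
  set g : Int → Int := fun b => stepT (m - b * b) with hg_def
  have hg : ∀ x, g (-x) = g x := by
    intro x; simp only [hg_def, neg_mul_neg]
  -- symmetry
  obtain ⟨sn, hsn⟩ : ∃ k : Nat, (k : Int) = s := ⟨s.toNat, Int.toNat_of_nonneg hs0⟩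
  have hsym := sum_sym g hg sn
  rw [hsn] at hsym
  rw [hsym]
  -- truncation
  have htr := sum_trunc g t s ht0 hts (by
    intro x hx1 hx2
    have hneg : m - x * x < 0 := by nlinarith [lt_isqrtI_succ_sq hm]
    simp only [hg_def]
    exact stepT_neg hneg)
  rw [htr]
  -- expand r2B
  have hr2 : r2B m = 0 + ((PySem.List.pyRange 0 (t + 1) 1).map
      (fun b => if isqrtI (m - b * b) * isqrtI (m - b * b) = m - b * b then
        (if b = 0 then 1 else 2) * (if isqrtI (m - b * b) = 0 then 1 else 2) else 0)).sum := by
    unfold r2B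
    apply foldl_eq_add_sum
    intro acc x
    simp only []
    split_ifs <;> ring
  rw [hr2]
  have hsplit : PySem.List.pyRange (0 : Int) (t + 1) 1 = 0 :: PySem.List.pyRange 1 (t + 1) 1 :=
    PySem.List.pyRange_one_cons (by omega)
  rw [hsplit]
  simp only [List.map_cons, List.sum_cons]
  -- tail terms are doubled
  have htail : ((PySem.List.pyRange 1 (t + 1) 1).map
      (fun b => if isqrtI (m - b * b) * isqrtI (m - b * b) = m - b * b then
        (if b = 0 then 1 else 2) * (if isqrtI (m - b * b) = 0 then 1 else 2) else 0)).sum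
      = 2 * ((PySem.List.pyRange 1 (t + 1) 1).map g).sum := by
    rw [← List.sum_map_mul_left]
    apply congrArg
    apply List.map_congr_left
    intro b hb
    rw [PySem.List.mem_pyRange_one] at hb
    have hb1 : (1:Int) ≤ b := hb.1
    have hbt : b ≤ t := by omega
    have hrem : 0 ≤ m - b * b := by nlinarith [isqrtI_sq_le hm]
    have hb0 : b ≠ 0 := by omega
    simp only [hg_def, stepT, hb0, if_false, if_neg (not_lt.mpr hrem)]
    have := isqrtI_nonneg (m - b * b)
    split_ifs <;> omega
  rw [htail]
  have hhead : (if isqrtI (m - 0 * 0) * isqrtI (m - 0 * 0) = m - 0 * 0 then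
      (if True then 1 else 2) * (if isqrtI (m - 0 * 0) = 0 then (1:Int) else 2) else 0) = g 0 := by
    simp only [hg_def, stepT, mul_zero, sub_zero, if_true]
    have h := isqrtI_nonneg m
    rw [if_neg (not_lt.mpr hm)]
    split_ifs <;> omega
  rw [hhead]
  ring

-- ===== VERDICT (by name: the statement is the Claim_ definition above) =====
theorem r3_spec : Claim_equal_r3 := by
  intro n _ hn
  show r3 n = r3_alt n
  have hn' : (0:Int) ≤ n := hn
  unfold r3 r3_alt
  simp only []
  set s := isqrtI n with hs_def
  have hs0 : 0 ≤ s := isqrtI_nonneg n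
  set G : Int → Int := fun a =>
    ((PySem.List.pyRange (-s) (s + 1) 1).map (fun b => stepT (n - a * a - b * b))).sum with hG_def
  -- A: rewrite both folds as sums
  have hA : (PySem.List.pyRange (-s) (s + 1) 1).foldl (fun count a =>
      (PySem.List.pyRange (-s) (s + 1) 1).foldl (fun count b =>
        let rem := n - a * a - b * b
        if rem < 0 then count
        else
          let c := isqrtI rem
          if c * c = rem then
            let count := count + 1
            if c > 0 then count + 1 else count
          else count) count) 0
      = 0 + ((PySem.List.pyRange (-s) (s + 1) 1).map G).sum := by
    apply foldl_eq_add_sum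
    intro acc a
    apply foldl_eq_add_sum
    intro acc2 b
    simp only [stepT]
    split_ifs <;> ring
  rw [hA]
  have hGeven : ∀ x, G (-x) = G x := by
    intro x; simp only [hG_def, neg_mul_neg]
  obtain ⟨sn, hsn⟩ : ∃ k : Nat, (k : Int) = s := ⟨s.toNat, Int.toNat_of_nonneg hs0⟩
  have hsym := sum_sym G hGeven sn
  rw [hsn] at hsym
  rw [hsym]
  have hG0 : G 0 = r2B n := by
    have := inner_eq_r2B n 0 hn' (by omega)
    simp only [hG_def]
    simpa using this
  have hGa : ((PySem.List.pyRange 1 (s + 1) 1).map G).sum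
      = ((PySem.List.pyRange 1 (s + 1) 1).map (fun a => r2B (n - a * a))).sum := by
    apply congrArg
    apply List.map_congr_left
    intro a hma
    rw [PySem.List.mem_pyRange_one] at hma
    have ha : a * a ≤ n := by nlinarith [isqrtI_sq_le hn']
    exact inner_eq_r2B n a hn' ha
  -- B: rewrite its fold as a sum
  have hB : (PySem.List.pyRange 1 (s + 1) 1).foldl
      (fun total a => total + 2 * r2B (n - a * a)) (r2B n)
      = r2B n + ((PySem.List.pyRange 1 (s + 1) 1).map (fun a => 2 * r2B (n - a * a))).sum := by
    apply foldl_eq_add_sum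
    intro acc a; rfl
  rw [hB, hG0, hGa, List.sum_map_mul_left]
  ring
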